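-- pv_equiv track=rewrite | github.com/limnyn/python_codingtest | 프로그래머스/172927_광물캐기.py | cost_cal
-- ===== SOURCE A (Python) =====
-- def cost_cal(next_minerals):
--     lst = [0, 0, 0]
--     for item in next_minerals:
--         if item == "diamond":
--             lst[0] += 1
--         elif item == "iron":
--             lst[1] += 1
--         else:
--             lst[2] += 1
--
--     return lst
-- ===== SOURCE B (Python) =====
-- def cost_cal(next_minerals):
--     freq = {}
--     for m in next_minerals:
--         freq[m] = freq.get(m, 0) + 1
--     stone = sum(v for k, v in freq.items() if k != "diamond" and k != "iron")
--     return [freq.get("diamond", 0), freq.get("iron", 0), stone]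
-- ===== Notes on version B (the rewrite author's own statement) =====
-- stated objective: alternative
-- what changed: Instead of per-item if/elif/else branching into a fixed 3-slot list, B first groups the minerals into a frequency dictionary, then reads diamond/iron by lookup and derives stone by summing the counts of all remaining distinct keys.
import Mathlib
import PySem

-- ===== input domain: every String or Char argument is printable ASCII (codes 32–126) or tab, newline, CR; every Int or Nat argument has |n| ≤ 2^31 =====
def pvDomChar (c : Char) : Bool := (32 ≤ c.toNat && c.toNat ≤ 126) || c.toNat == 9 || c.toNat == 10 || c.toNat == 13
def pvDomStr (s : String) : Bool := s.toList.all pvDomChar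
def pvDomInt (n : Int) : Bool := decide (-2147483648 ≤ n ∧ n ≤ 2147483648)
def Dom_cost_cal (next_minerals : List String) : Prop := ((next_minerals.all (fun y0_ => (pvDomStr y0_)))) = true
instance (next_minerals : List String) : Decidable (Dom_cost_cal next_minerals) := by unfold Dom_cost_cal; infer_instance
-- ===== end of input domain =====

-- B groups the minerals into a frequency dict, reads diamond/iron by lookup and sums the other keys' counts for stone (alternative decomposition).

-- ===== PORT A =====
def cost_cal (next_minerals : List String) : List Int :=
  let lst :=
    next_minerals.foldl (fun (lst : Int × Int × Int) item =>
      if item == "diamond" then (lst.1 + 1, lst.2.1, lst.2.2)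
      else if item == "iron" then (lst.1, lst.2.1 + 1, lst.2.2)
      else (lst.1, lst.2.1, lst.2.2 + 1)) (0, 0, 0)
  [lst.1, lst.2.1, lst.2.2]

-- ===== PORT B =====
def cost_cal_alt (next_minerals : List String) : List Int :=
  let freq : PySem.Dict String Int :=
    next_minerals.foldl (fun d m => d.insert m (d.getD m 0 + 1)) PySem.Dict.empty
  let stone : Int :=
    ((freq.items.filter (fun p => !(p.1 == "diamond") && !(p.1 == "iron"))).map (·.2)).sum
  [freq.getD "diamond" 0, freq.getD "iron" 0, stone]

-- ===== PRECONDITION & SPEC =====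
def Spec_cost_cal (next_minerals : List String) (out : List Int) : Prop := out = cost_cal_alt next_minerals
instance (next_minerals : List String) (out : List Int) : Decidable (Spec_cost_cal next_minerals out) := by unfold Spec_cost_cal; infer_instance

-- ===== CLAIM (what is proved, stated in full; the proofs are below) =====
def Claim_equal_cost_cal : Prop := ∀ (next_minerals : List String), Dom_cost_cal next_minerals → Spec_cost_cal next_minerals (cost_cal next_minerals)

-- ===== LEMMAS AND PROOFS =====

-- A's fold: a running (diamond, iron, stone) triple, characterised by counts.
theorem cost_cal_foldl (ms : List String) (a b c : Int) :
    ms.foldl (fun (lst : Int × Int × Int) item =>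
      if item == "diamond" then (lst.1 + 1, lst.2.1, lst.2.2)
      else if item == "iron" then (lst.1, lst.2.1 + 1, lst.2.2)
      else (lst.1, lst.2.1, lst.2.2 + 1)) (a, b, c)
    = (a + ms.count "diamond", b + ms.count "iron",
       c + ms.countP (fun x => !(x == "diamond") && !(x == "iron"))) := by
  induction ms generalizing a b c with
  | nil => simp
  | cons x xs ih =>
    rw [List.foldl_cons]
    by_cases hd : x = "diamond"
    · rw [if_pos (by simp [hd]), ih]
      simp [Prod.ext_iff, hd]
      omega
    · by_cases hi : x = "iron"
      · rw [if_neg (by simp [hd]), if_pos (by simp [hi]), ih]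
        simp [Prod.ext_iff, hi]
        omega
      · rw [if_neg (by simp [hd]), if_neg (by simp [hi]), ih]
        simp [Prod.ext_iff, hd, hi]
        omega

-- Summing the multiplicities of the distinct keys satisfying p recovers countP p.
theorem sum_count_ofList_filter (ms : List String) (p : String → Bool) :
    (((PySem.Set.ofList ms).filter p).map (fun k => (ms.count k : Int))).sum
      = (ms.countP p : Int) := by
  have hperm : (PySem.Set.ofList ms).Perm ms.dedup := by
    rw [List.perm_ext_iff_of_nodup (PySem.Set.nodup_ofList ms) ms.nodup_dedup]
    intro a
    rw [PySem.Set.mem_ofList, List.mem_dedup]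
  have := (((hperm.filter p).map (fun k => (ms.count k : Int))).sum_eq)
  rw [this]
  have hnat : ((ms.dedup.filter p).map (fun k => ms.count k)).sum = ms.countP p :=
    List.sum_map_count_dedup_filter_eq_countP p ms
  rw [show (fun k => ((ms.count k : Nat) : Int)) = (fun n : Nat => (n : Int)) ∘ (fun k => ms.count k) from rfl,
     ← List.map_map, ← Nat.cast_list_sum, hnat]

-- ===== VERDICT (by name: the statement is the Claim_ definition above) =====
theorem cost_cal_spec : Claim_equal_cost_cal := by
  intro ms _
  unfold Spec_cost_cal cost_cal cost_cal_alt
  rw [cost_cal_foldl, PySem.Dict.foldl_insert_getD_add_one_eq_counter]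
  simp only [PySem.Dict.getD_counter, PySem.Dict.items_counter]
  rw [List.filter_map, List.map_map]
  simp [Function.comp_def, sum_count_ofList_filter]
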